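-- pv_equiv track=rewrite | github.com/yangyang5214/go_fleet | leets/58/58.py | lengthOfLastWord1
-- ===== SOURCE A (Python) =====
-- def lengthOfLastWord1(s: str) -> int:
--     """
--     ignore...理解错题目了
--     :param s:
--     :return:
--     """
--     r, count = 0, 0
--     for item in s:
--         if item == " ":
--             r = max(r, count)
--             count = 0
--         else:
--             count += 1
--     return max(r, count)  # 注意最后一次
-- ===== SOURCE B (Python) =====
-- def lengthOfLastWord1(s: str) -> int:
--     # Split on the literal single space (keeps empty tokens), then reduce:
--     # max token length.  split(" ") always yields at least one element.
--     return max(len(w) for w in s.split(" "))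
-- ===== Notes on version B (the rewrite author's own statement) =====
-- stated objective: simpler
-- what changed: Replaces A's char-by-char running-count scan with a build-segments-then-reduce decomposition: split on the literal single space and take the maximum token length.
import Mathlib
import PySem

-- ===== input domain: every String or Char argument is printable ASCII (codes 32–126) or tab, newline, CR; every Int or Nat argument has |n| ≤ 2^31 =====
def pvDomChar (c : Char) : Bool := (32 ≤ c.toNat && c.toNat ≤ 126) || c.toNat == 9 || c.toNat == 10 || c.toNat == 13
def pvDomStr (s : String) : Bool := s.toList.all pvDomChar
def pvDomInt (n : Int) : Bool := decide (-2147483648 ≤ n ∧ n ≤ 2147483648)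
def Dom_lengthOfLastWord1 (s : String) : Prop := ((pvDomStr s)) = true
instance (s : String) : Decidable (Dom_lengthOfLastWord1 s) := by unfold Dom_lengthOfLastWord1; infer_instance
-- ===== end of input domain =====

-- B replaces A's char-by-char running-count scan with split-on-" "-then-max (simpler decomposition, same cost).


-- ===== PORT A =====
-- r, count = 0, 0; for item in s: …; return max(r, count)
def lengthOfLastWord1 (s : String) : Int :=
  let st := s.toList.foldl
    (fun (p : Int × Int) item =>
      if item = ' ' then (max p.1 p.2, 0) else (p.1, p.2 + 1))
    (0, 0)
  max st.1 st.2

-- ===== PORT B =====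
-- return max(len(w) for w in s.split(" "))
-- s.split(" ") is never empty, so Python's max always returns; the .getD 0 default is never used.
def lengthOfLastWord1_alt (s : String) : Int :=
  let lens := (PySem.Chars.splitOn s.toList " ".toList).map (fun w => (w.length : Int))
  (PySem.List.max? lens (fun x => x)).getD 0

-- ===== PRECONDITION & SPEC =====
def Spec_lengthOfLastWord1 (s : String) (out : Int) : Prop := out = lengthOfLastWord1_alt s
instance (s : String) (out : Int) : Decidable (Spec_lengthOfLastWord1 s out) := by unfold Spec_lengthOfLastWord1; infer_instance

-- ===== CLAIM (what is proved, stated in full; the proofs are below) =====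
def Claim_equal_lengthOfLastWord1 : Prop := ∀ (s : String), Dom_lengthOfLastWord1 s → Spec_lengthOfLastWord1 s (lengthOfLastWord1 s)

-- ===== LEMMAS AND PROOFS =====

-- reference form of splitting on a single space, keeping empty segments
def pySegs : List Char → List (List Char)
  | [] => [[]]
  | c :: rest => if c = ' ' then [] :: pySegs rest else (pySegs rest).modifyHead (c :: ·)

theorem pySegs_ne_nil (l : List Char) : pySegs l ≠ [] := by
  induction l with
  | nil => simp [pySegs]
  | cons c rest ih =>
    simp only [pySegs]
    split
    · simp
    · cases h : pySegs rest with
      | nil => exact absurd h ih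
      | cons a t => simp [List.modifyHead]

theorem splitOn_go_eq (l : List Char) : ∀ (fuel : Nat) (cur : List Char) (acc : List (List Char)),
    l.length + 1 ≤ fuel →
    PySem.Chars.splitOn.go [' '] fuel l cur acc
      = acc.reverse ++ (pySegs l).modifyHead (cur.reverse ++ ·) := by
  induction l with
  | nil =>
    intro fuel cur acc h
    match fuel, h with
    | fuel + 1, _ => simp [PySem.Chars.splitOn.go, pySegs]
  | cons c rest ih =>
    intro fuel cur acc h
    match fuel, h with
    | fuel + 1, h =>
      simp only [List.length_cons] at h
      by_cases hc : c = ' '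
      · subst hc
        have : List.isPrefixOf [' '] (' ' :: rest) = true := by
          simp [List.isPrefixOf]
        simp only [PySem.Chars.splitOn.go, this, if_pos, List.length_cons,
          List.length_nil, List.drop_succ_cons, List.drop_zero]
        rw [ih fuel [] (cur.reverse :: acc) (by omega)]
        cases hr : pySegs rest with
        | nil => exact absurd hr (pySegs_ne_nil rest)
        | cons a t => simp [pySegs, List.modifyHead, hr]
      · have : List.isPrefixOf [' '] (c :: rest) = false := by
          simp [List.isPrefixOf]
          exact fun h => absurd h.symm hc
        simp only [PySem.Chars.splitOn.go, this, Bool.false_eq_true, if_false]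
        rw [ih fuel (c :: cur) acc (by omega)]
        simp only [pySegs, if_neg hc]
        cases h : pySegs rest with
        | nil => exact absurd h (pySegs_ne_nil rest)
        | cons a t => simp [List.modifyHead]

theorem splitOn_eq_pySegs (l : List Char) :
    PySem.Chars.splitOn l [' '] = pySegs l := by
  rw [PySem.Chars.splitOn, splitOn_go_eq l (l.length + 1) [] [] (le_refl _)]
  cases h : pySegs l with
  | nil => exact absurd h (pySegs_ne_nil l)
  | cons a t => simp [List.modifyHead]

theorem foldl_max_pull (l : List Int) : ∀ (a b : Int),
    List.foldl max (max a b) l = max a (List.foldl max b l) := by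
  induction l with
  | nil => intro a b; simp
  | cons x t ih =>
    intro a b
    simp only [List.foldl]
    rw [max_assoc, ih]

theorem max?_cons_getD (x : Int) (xs : List Int) (d : Int) :
    (PySem.List.max? (x :: xs) (fun y => y)).getD d = List.foldl max x xs := by
  simp only [PySem.List.max?, List.foldl]
  induction xs generalizing x with
  | nil => simp
  | cons y t ih =>
    simp only [List.foldl]
    split
    · rw [ih, max_eq_right (by omega)]
    · rw [ih, max_eq_left (by omega)]

-- A's loop from state (r, count) computes max r (foldl max (count + |seg₀|) |rest segs|)
theorem loop_eq_segs (cs : List Char) : ∀ (r count : Int),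
    max (cs.foldl
        (fun (p : Int × Int) item =>
          if item = ' ' then (max p.1 p.2, 0) else (p.1, p.2 + 1)) (r, count)).1
      (cs.foldl
        (fun (p : Int × Int) item =>
          if item = ' ' then (max p.1 p.2, 0) else (p.1, p.2 + 1)) (r, count)).2
      = match pySegs cs with
        | seg :: rest => max r (List.foldl max (count + (seg.length : Int)) (rest.map (fun w => (w.length : Int))))
        | [] => 0 := by
  induction cs with
  | nil => intro r count; simp [pySegs]
  | cons c rest ih =>
    intro r count
    by_cases hc : c = ' '
    · subst hc
      have hps : pySegs (' ' :: rest) = [] :: pySegs rest := by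
        rw [pySegs, if_pos rfl]
      rw [List.foldl_cons, if_pos rfl, ih (max r count) 0, hps]
      cases h : pySegs rest with
      | nil => exact absurd h (pySegs_ne_nil rest)
      | cons seg segs =>
        simp only [List.length_nil, Nat.cast_zero, add_zero, zero_add,
          List.map_cons, List.foldl_cons]
        rw [foldl_max_pull, ← max_assoc]
    · rw [List.foldl_cons, if_neg hc, ih r (count + 1)]
      simp only [pySegs, if_neg hc]
      cases h : pySegs rest with
      | nil => exact absurd h (pySegs_ne_nil rest)
      | cons seg segs =>
        simp only [List.modifyHead, List.length_cons]
        congr 2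
        push_cast
        ring

theorem le_foldl_max (l : List Int) : ∀ a : Int, a ≤ List.foldl max a l := by
  induction l with
  | nil => intro a; simp
  | cons x t ih => intro a; exact le_trans (le_max_left a x) (ih (max a x))

theorem seg_len_nonneg (seg : List Char) : (0 : Int) ≤ (seg.length : Int) := by positivity

-- ===== VERDICT (by name: the statement is the Claim_ definition above) =====
theorem lengthOfLastWord1_spec : Claim_equal_lengthOfLastWord1 := by
  intro s _
  unfold Spec_lengthOfLastWord1
  simp only [lengthOfLastWord1, lengthOfLastWord1_alt]
  rw [loop_eq_segs s.toList 0 0]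
  have hsep : " ".toList = [' '] := rfl
  rw [hsep, splitOn_eq_pySegs]
  cases h : pySegs s.toList with
  | nil => exact absurd h (pySegs_ne_nil s.toList)
  | cons seg segs =>
    simp only [List.map_cons]
    rw [max?_cons_getD, zero_add, max_comm]
    exact max_eq_left (le_trans (seg_len_nonneg seg) (le_foldl_max _ _))
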